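-- pv_equiv track=rewrite | github.com/jso122-2/DAWN_pub_real | juliet_flower.py | _amplify_emotion
-- ===== SOURCE A (Python) =====
-- def _amplify_emotion(content: str) -> str:
--     """Amplify emotional content"""
--     emotion_amplifiers = {
--         "happy": "joyous",
--         "sad": "melancholic",
--         "angry": "tempestuous",
--         "love": "passionate",
--         "fear": "trembling"
--     }
--
--     for mild, intense in emotion_amplifiers.items():
--         content = content.replace(mild, intense)
--
--     return content
-- ===== SOURCE B (Python) =====
-- def _amplify_emotion(content: str) -> str:
--     """Amplify emotional content (single left-to-right pass)."""
--     emotion_amplifiers = {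
--         "happy": "joyous",
--         "sad": "melancholic",
--         "angry": "tempestuous",
--         "love": "passionate",
--         "fear": "trembling"
--     }
--
--     out = []
--     i = 0
--     n = len(content)
--     while i < n:
--         for mild, intense in emotion_amplifiers.items():
--             if content.startswith(mild, i):
--                 out.append(intense)
--                 i += len(mild)
--                 break
--         else:
--             out.append(content[i])
--             i += 1
--     return "".join(out)
-- ===== Notes on version B (the rewrite author's own statement) =====
-- stated objective: alternative
-- what changed: B replaces all five emotion words in ONE left-to-right scan of the content (at each position try the keys, emit the amplified word or the character), instead of A's five full str.replace passes, so B never re-matches text produced by an earlier replacement.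
-- intended difference: On contents containing the substring 'happyad', A's second pass re-matches the emergent 'sad' spanning the boundary of its own 'happy'->'joyous' replacement (A('happyad')='joyoumelancholic'), while B amplifies only words present in the original text (B('happyad')='joyousad'), which is the intended behaviour. — e.g. on _amplify_emotion("happyad"): A returns "joyoumelancholic", B returns "joyousad"
import Mathlib
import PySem

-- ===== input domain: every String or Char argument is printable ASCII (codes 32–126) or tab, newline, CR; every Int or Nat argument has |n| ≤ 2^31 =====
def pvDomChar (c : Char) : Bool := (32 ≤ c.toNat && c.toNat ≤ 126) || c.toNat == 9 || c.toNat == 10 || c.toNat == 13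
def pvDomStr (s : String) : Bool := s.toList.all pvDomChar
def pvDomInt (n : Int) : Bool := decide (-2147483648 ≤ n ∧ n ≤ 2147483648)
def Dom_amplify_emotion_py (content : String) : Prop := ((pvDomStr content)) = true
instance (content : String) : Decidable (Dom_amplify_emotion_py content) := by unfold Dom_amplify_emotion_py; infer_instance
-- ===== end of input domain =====

-- B replaces the five emotion words in a single left-to-right scan instead of A's five
-- sequential full replace passes (alternative algorithm, same cost class); B therefore
-- never re-matches text produced by an earlier replacement (see D_ below).

-- ===== PORT A =====
def amplify_emotion_py (content : String) : String :=
  -- dict → association list; the for-loop over items() is a foldl of str.replace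
  let emotion_amplifiers : List (String × String) :=
    [("happy", "joyous"), ("sad", "melancholic"), ("angry", "tempestuous"),
     ("love", "passionate"), ("fear", "trembling")]
  emotion_amplifiers.foldl (fun content kv => PySem.Str.replace content kv.1 kv.2) content

-- ===== PORT B =====
-- B's while-loop over the content with an inner first-match loop over the items.
-- All keys are nonempty literals, so 't.drop (kv.1.length - 1)' is Python's 'i += len(mild)'
-- (i.e. dropping kv.1.length characters of c :: t).
def pvScanGo (ks : List (List Char × List Char)) : List Char → List Char
  | [] => []
  | c :: t =>
    match ks.find? (fun kv => kv.1.isPrefixOf (c :: t)) with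
    | some kv => kv.2 ++ pvScanGo ks (t.drop (kv.1.length - 1))
    | none => c :: pvScanGo ks t
termination_by l => l.length
decreasing_by
  · simp only [List.length_cons, List.length_drop]; omega
  · simp

def amplify_emotion_py_alt (content : String) : String :=
  -- dict → association list of char lists; out-list + join = String.ofList of the scanned chars
  let emotion_amplifiers : List (List Char × List Char) :=
    [("happy".toList, "joyous".toList), ("sad".toList, "melancholic".toList),
     ("angry".toList, "tempestuous".toList), ("love".toList, "passionate".toList),
     ("fear".toList, "trembling".toList)]
  String.ofList (pvScanGo emotion_amplifiers content.toList)

-- ===== PRECONDITION & SPEC =====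
-- On contents containing "happyad", A's second pass re-matches the emergent "sad" spanning the
-- boundary of its own "happy"->"joyous" replacement (A "happyad" = "joyoumelancholic"), while B
-- amplifies only the emotion words present in the original text (B "happyad" = "joyousad"),
-- which is the intended behaviour.
def D_amplify_emotion_py (content : String) : Prop := PySem.Str.isIn "happyad" content = true
instance (content : String) : Decidable (D_amplify_emotion_py content) := by
  unfold D_amplify_emotion_py; infer_instance

def Spec_amplify_emotion_py (content : String) (out : String) : Prop :=
  ¬ D_amplify_emotion_py content → out = amplify_emotion_py_alt content
instance (content : String) (out : String) : Decidable (Spec_amplify_emotion_py content out) := by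
  unfold Spec_amplify_emotion_py; infer_instance

def pvDiffWitness_amplify_emotion_py : String := "happyad"
def pvDiffWitnessOut_amplify_emotion_py : String × String := ("joyoumelancholic", "joyousad")

-- ===== CLAIM (what is proved, stated in full; the proofs are below) =====
def Claim_unchanged_amplify_emotion_py : Prop :=
  ∀ (content : String), Dom_amplify_emotion_py content →
    Spec_amplify_emotion_py content (amplify_emotion_py content)

def Claim_changed_amplify_emotion_py : Prop :=
  Dom_amplify_emotion_py (pvDiffWitness_amplify_emotion_py) ∧
  D_amplify_emotion_py (pvDiffWitness_amplify_emotion_py) ∧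
  amplify_emotion_py (pvDiffWitness_amplify_emotion_py) = pvDiffWitnessOut_amplify_emotion_py.1 ∧
  amplify_emotion_py_alt (pvDiffWitness_amplify_emotion_py) = pvDiffWitnessOut_amplify_emotion_py.2 ∧
  pvDiffWitnessOut_amplify_emotion_py.1 ≠ pvDiffWitnessOut_amplify_emotion_py.2

def Claim_exact_amplify_emotion_py : Prop :=
  ∀ (content : String), Dom_amplify_emotion_py content →
    D_amplify_emotion_py content →
      amplify_emotion_py content ≠ amplify_emotion_py_alt content

-- ===== LEMMAS AND PROOFS =====

-- A clean structural form of PySem.Chars.replace (for nonempty old): one left-to-right pass.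
def pvRep (old new : List Char) : List Char → List Char
  | [] => []
  | c :: t =>
    if old.isPrefixOf (c :: t) then new ++ pvRep old new (t.drop (old.length - 1))
    else c :: pvRep old new t
termination_by l => l.length
decreasing_by
  · simp only [List.length_cons, List.length_drop]; omega
  · simp

theorem pvRep_nil (old new : List Char) : pvRep old new [] = [] := by simp [pvRep]

theorem pvRep_pos (old new : List Char) (c : Char) (t : List Char)
    (h : old <+: (c :: t)) :
    pvRep old new (c :: t) = new ++ pvRep old new (t.drop (old.length - 1)) := by
  rw [pvRep]; simp [List.isPrefixOf_iff_prefix.2 h]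

theorem pvRep_neg (old new : List Char) (c : Char) (t : List Char)
    (h : ¬ old <+: (c :: t)) :
    pvRep old new (c :: t) = c :: pvRep old new t := by
  rw [pvRep]
  have : old.isPrefixOf (c :: t) = false := by
    cases hb : old.isPrefixOf (c :: t)
    · rfl
    · exact absurd (List.isPrefixOf_iff_prefix.1 hb) h
  simp [this]

theorem pvRep_key (old new : List Char) (hne : old ≠ []) (r : List Char) :
    pvRep old new (old ++ r) = new ++ pvRep old new r := by
  cases old with
  | nil => exact absurd rfl hne
  | cons a ot =>
    have hpre : (a :: ot) <+: ((a :: ot) ++ r) := List.prefix_append _ _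
    rw [show (a :: ot) ++ r = a :: (ot ++ r) from rfl, pvRep_pos _ _ _ _ (by simpa using hpre)]
    simp

theorem pv_go_eq (old new : List Char) (h : old ≠ []) :
    ∀ (fuel : Nat) (l acc : List Char), l.length ≤ fuel →
      PySem.Chars.replace.go old new fuel l acc = acc.reverse ++ pvRep old new l := by
  intro fuel
  induction fuel with
  | zero =>
    intro l acc hl
    have : l = [] := List.eq_nil_of_length_eq_zero (Nat.le_zero.1 hl)
    subst this
    rw [PySem.Chars.replace.go.eq_def]
    simp [pvRep_nil]
  | succ fuel ih =>
    intro l acc hl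
    cases l with
    | nil => rw [PySem.Chars.replace.go.eq_def]; simp [pvRep_nil]
    | cons c t =>
      rw [PySem.Chars.replace.go.eq_def]
      by_cases hp : old <+: (c :: t)
      · have hb : old.isPrefixOf (c :: t) = true := List.isPrefixOf_iff_prefix.2 hp
        have hdrop : List.drop old.length (c :: t) = t.drop (old.length - 1) := by
          cases old with
          | nil => exact absurd rfl h
          | cons a ot => simp
        simp only [hb, if_true, pvRep_pos old new c t hp]
        rw [hdrop, ih _ _ (by simp at hl ⊢; omega)]
        simp
      · have hb : old.isPrefixOf (c :: t) = false := by
          cases hb2 : old.isPrefixOf (c :: t)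
          · rfl
          · exact absurd (List.isPrefixOf_iff_prefix.1 hb2) hp
        simp only [hb, Bool.false_eq_true, if_false, pvRep_neg old new c t hp]
        rw [ih _ _ (by simp at hl ⊢; omega)]
        simp

theorem pv_replace_eq (s old new : List Char) (h : old ≠ []) :
    PySem.Chars.replace s old new = pvRep old new s := by
  unfold PySem.Chars.replace
  have : old.isEmpty = false := by cases old with | nil => exact absurd rfl h | cons a t => rfl
  simp only [this, Bool.false_eq_true, if_false]
  simpa using pv_go_eq old new h s.length s [] le_rfl

theorem pvRep_append_nomatch (old new : List Char) (b : List Char) :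
    ∀ (w : List Char), (∀ i, i < w.length → ¬ old <+: (w.drop i ++ b)) →
      pvRep old new (w ++ b) = w ++ pvRep old new b := by
  intro w
  induction w with
  | nil => intro _; simp
  | cons c w' ih =>
    intro h
    have h0 : ¬ old <+: (c :: (w' ++ b)) := by
      have := h 0 (by simp)
      simpa using this
    rw [List.cons_append, pvRep_neg _ _ _ _ h0,
        ih (fun i hi => by simpa using h (i+1) (by simpa using hi))]
    simp

theorem pvScanGo_nil (ks : List (List Char × List Char)) : pvScanGo ks [] = [] := by
  simp [pvScanGo]

theorem pvScanGo_none (ks : List (List Char × List Char)) (c : Char) (t : List Char)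
    (h : ks.find? (fun kv => kv.1.isPrefixOf (c :: t)) = none) :
    pvScanGo ks (c :: t) = c :: pvScanGo ks t := by
  rw [pvScanGo]; simp [h]

theorem pvScanGo_some (ks : List (List Char × List Char)) (c : Char) (t : List Char)
    (kv : List Char × List Char)
    (h : ks.find? (fun kv => kv.1.isPrefixOf (c :: t)) = some kv) :
    pvScanGo ks (c :: t) = kv.2 ++ pvScanGo ks (t.drop (kv.1.length - 1)) := by
  rw [pvScanGo]; simp [h]

theorem pvScanGo_append_nomatch (ks : List (List Char × List Char)) (b : List Char) :
    ∀ (w : List Char),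
      (∀ i, i < w.length → ks.find? (fun kv => kv.1.isPrefixOf (w.drop i ++ b)) = none) →
      pvScanGo ks (w ++ b) = w ++ pvScanGo ks b := by
  intro w
  induction w with
  | nil => intro _; simp
  | cons c w' ih =>
    intro h
    have h0 := h 0 (by simp)
    simp only [List.drop_zero, List.cons_append] at h0
    rw [List.cons_append, pvScanGo_none _ _ _ h0,
        ih (fun i hi => by simpa using h (i+1) (by simpa using hi))]
    simp

theorem pvScanGo_reflect (ks : List (List Char × List Char))
    (hvals : ∀ kv ∈ ks, kv.2 ≠ []) (p : List Char)
    (hp : ∀ kv ∈ ks, ∀ a ∈ p, kv.2.head? ≠ some a) :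
    ∀ t, p <+: pvScanGo ks t → p <+: t := by
  induction p with
  | nil => intro t _; exact List.nil_prefix
  | cons a p' ih =>
    intro t hpre
    cases t with
    | nil =>
      rw [pvScanGo_nil] at hpre
      exact absurd (List.prefix_nil.1 hpre) (by simp)
    | cons c t' =>
      cases hf : ks.find? (fun kv => kv.1.isPrefixOf (c :: t')) with
      | some kv =>
        rw [pvScanGo_some _ _ _ _ hf] at hpre
        have hmem := List.mem_of_find?_eq_some hf
        cases hv : kv.2 with
        | nil => exact absurd hv (hvals kv hmem)
        | cons nh ntl =>
          rw [hv, List.cons_append] at hpre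
          have : a = nh := (List.cons_prefix_cons.1 hpre).1
          exact absurd (by simp [hv, this] : kv.2.head? = some a)
            (hp kv hmem a (by simp))
      | none =>
        rw [pvScanGo_none _ _ _ hf] at hpre
        obtain ⟨hac, hp'⟩ := List.cons_prefix_cons.1 hpre
        exact List.cons_prefix_cons.2
          ⟨hac, ih (fun kv hm b hb => hp kv hm b (by simp [hb])) t' hp'⟩

theorem pvScan_one (k v : List Char) :
    ∀ (n : Nat) (t : List Char), t.length ≤ n → pvScanGo [(k, v)] t = pvRep k v t := by
  intro n
  induction n with
  | zero =>
    intro t ht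
    have : t = [] := List.eq_nil_of_length_eq_zero (Nat.le_zero.1 ht)
    subst this
    rw [pvScanGo_nil, pvRep_nil]
  | succ n ih =>
    intro t ht
    cases t with
    | nil => rw [pvScanGo_nil, pvRep_nil]
    | cons c t' =>
      by_cases hk : k <+: (c :: t')
      · have hf : List.find? (fun kv => kv.1.isPrefixOf (c :: t')) [(k, v)] = some (k, v) := by
          simp [List.find?, List.isPrefixOf_iff_prefix.2 hk]
        rw [pvScanGo_some _ _ _ _ hf, pvRep_pos _ _ _ _ hk,
            ih _ (by simp at ht ⊢; omega)]
      · have hb : k.isPrefixOf (c :: t') = false := by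
          cases hb2 : k.isPrefixOf (c :: t')
          · rfl
          · exact absurd (List.isPrefixOf_iff_prefix.1 hb2) hk
        have hf : List.find? (fun kv => kv.1.isPrefixOf (c :: t')) [(k, v)] = none := by
          simp [List.find?, hb]
        rw [pvScanGo_none _ _ _ hf, pvRep_neg _ _ _ _ hk,
            ih _ (by simp at ht ⊢; omega)]

-- Generic stage lemma: appending one further (key, value) pair to the scan equals running one
-- more replace pass after the scan, provided the new key cannot match inside or across any
-- already-produced value and no earlier key matches inside the new key.
theorem pvStage (ks : List (List Char × List Char)) (k v : List Char)
    (hk : k ≠ [])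
    (hvals : ∀ kv ∈ ks, kv.2 ≠ [])
    (hpass : ∀ kv ∈ ks, ∀ b : List Char, ∀ i, i < kv.2.length → ¬ k <+: (kv.2.drop i ++ b))
    (hrefl : ∀ kv ∈ ks, ∀ a ∈ k.tail, kv.2.head? ≠ some a)
    (hself : ∀ b : List Char, ∀ i, i < k.length →
      ks.find? (fun kv => kv.1.isPrefixOf (k.drop i ++ b)) = none) :
    ∀ (n : Nat) (t : List Char), t.length ≤ n →
      pvRep k v (pvScanGo ks t) = pvScanGo (ks ++ [(k, v)]) t := by
  intro n
  induction n with
  | zero =>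
    intro t ht
    have : t = [] := List.eq_nil_of_length_eq_zero (Nat.le_zero.1 ht)
    subst this
    rw [pvScanGo_nil, pvScanGo_nil, pvRep_nil]
  | succ n ih =>
    intro t ht
    cases t with
    | nil => rw [pvScanGo_nil, pvScanGo_nil, pvRep_nil]
    | cons c t' =>
      cases hf : ks.find? (fun kv => kv.1.isPrefixOf (c :: t')) with
      | some kv =>
        have hmem := List.mem_of_find?_eq_some hf
        have hf2 : (ks ++ [(k, v)]).find? (fun kv => kv.1.isPrefixOf (c :: t')) = some kv := by
          rw [List.find?_append, hf]; rfl
        rw [pvScanGo_some _ _ _ _ hf, pvScanGo_some _ _ _ _ hf2,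
            pvRep_append_nomatch k v _ kv.2 (fun i hi => hpass kv hmem _ i hi)]
        congr 1
        exact ih _ (by simp at ht ⊢; omega)
      | none =>
        by_cases hk2 : k <+: (c :: t')
        · obtain ⟨r, hr⟩ := hk2
          cases k with
          | nil => exact absurd rfl hk
          | cons a ktl =>
            rw [List.cons_append] at hr
            injection hr with hac ht'
            subst hac
            have hlen : r.length ≤ n := by
              have := congrArg List.length ht'
              simp at this ht ⊢
              omega
            calc pvRep (a :: ktl) v (pvScanGo ks (a :: t'))
                = pvRep (a :: ktl) v (pvScanGo ks ((a :: ktl) ++ r)) := by rw [List.cons_append, ht']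
              _ = pvRep (a :: ktl) v ((a :: ktl) ++ pvScanGo ks r) := by
                    rw [pvScanGo_append_nomatch ks r (a :: ktl) (fun i hi => hself r i hi)]
              _ = v ++ pvRep (a :: ktl) v (pvScanGo ks r) := pvRep_key _ _ (by simp) _
              _ = v ++ pvScanGo (ks ++ [(a :: ktl, v)]) r := by rw [ih r hlen]
              _ = pvScanGo (ks ++ [(a :: ktl, v)]) (a :: t') := by
                    have hpre : (a :: ktl) <+: (a :: t') := ⟨r, by rw [List.cons_append, ht']⟩
                    have hf2 : (ks ++ [(a :: ktl, v)]).find?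
                        (fun kv => kv.1.isPrefixOf (a :: t')) = some (a :: ktl, v) := by
                      rw [List.find?_append, hf]
                      simp [List.find?, List.isPrefixOf_iff_prefix.2 hpre]
                    rw [pvScanGo_some _ _ _ _ hf2]
                    congr 2
                    rw [← ht']
                    simp
        · have hbk : k.isPrefixOf (c :: t') = false := by
            cases hb2 : k.isPrefixOf (c :: t')
            · rfl
            · exact absurd (List.isPrefixOf_iff_prefix.1 hb2) hk2
          have hf2 : (ks ++ [(k, v)]).find? (fun kv => kv.1.isPrefixOf (c :: t')) = none := by
            rw [List.find?_append, hf]; simp [List.find?, hbk]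
          have hnk : ¬ k <+: (c :: pvScanGo ks t') := by
            intro hkk
            cases k with
            | nil => exact absurd rfl hk
            | cons a ktl =>
              obtain ⟨hac, htl⟩ := List.cons_prefix_cons.1 hkk
              have : ktl <+: t' :=
                pvScanGo_reflect ks hvals ktl
                  (fun kv hm b hb => hrefl kv hm b (by simpa using hb)) t' htl
              exact hk2 (List.cons_prefix_cons.2 ⟨hac, this⟩)
          rw [pvScanGo_none _ _ _ hf, pvScanGo_none _ _ _ hf2, pvRep_neg _ _ _ _ hnk,
              ih t' (by simp at ht ⊢; omega)]

def pvK1 : List Char := ['h', 'a', 'p', 'p', 'y']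
def pvV1 : List Char := ['j', 'o', 'y', 'o', 'u', 's']
def pvK2 : List Char := ['s', 'a', 'd']
def pvV2 : List Char := ['m', 'e', 'l', 'a', 'n', 'c', 'h', 'o', 'l', 'i', 'c']
def pvK3 : List Char := ['a', 'n', 'g', 'r', 'y']
def pvV3 : List Char := ['t', 'e', 'm', 'p', 'e', 's', 't', 'u', 'o', 'u', 's']
def pvK4 : List Char := ['l', 'o', 'v', 'e']
def pvV4 : List Char := ['p', 'a', 's', 's', 'i', 'o', 'n', 'a', 't', 'e']
def pvK5 : List Char := ['f', 'e', 'a', 'r']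
def pvV5 : List Char := ['t', 'r', 'e', 'm', 'b', 'l', 'i', 'n', 'g']
def pvHL : List Char := pvK1 ++ ['a', 'd']   -- "happyad"

-- Stage 2 is the one conditional stage: "sad" can match across the right boundary of an
-- inserted "joyous", which happens exactly when the original text contains "happyad".
theorem pvStage2 :
    ∀ (n : Nat) (t : List Char), t.length ≤ n → ¬ (pvHL <:+: t) →
      pvRep pvK2 pvV2 (pvScanGo [(pvK1, pvV1)] t) =
        pvScanGo [(pvK1, pvV1), (pvK2, pvV2)] t := by
  intro n
  induction n with
  | zero =>
    intro t ht _
    have : t = [] := List.eq_nil_of_length_eq_zero (Nat.le_zero.1 ht)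
    subst this
    rw [pvScanGo_nil, pvScanGo_nil, pvRep_nil]
  | succ n ih =>
    intro t ht hinf
    cases t with
    | nil => rw [pvScanGo_nil, pvScanGo_nil, pvRep_nil]
    | cons c t' =>
      by_cases hk1 : pvK1 <+: (c :: t')
      · -- "happy" matches at the front
        obtain ⟨r, hr⟩ := hk1
        rw [show pvK1 ++ r = 'h' :: (['a', 'p', 'p', 'y'] ++ r) from rfl] at hr
        injection hr with hac ht'
        subst hac
        have hrlen : r.length ≤ n := by
          have := congrArg List.length ht'
          simp at this ht ⊢
          omega
        have hrsuffix : ∀ x : List Char, x <:+: r → x <:+: ('h' :: t') := by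
          intro x hx
          exact hx.trans ⟨['h', 'a', 'p', 'p', 'y'], [], by simp [← ht']⟩
        have hnad : ¬ (['a', 'd'] <+: pvScanGo [(pvK1, pvV1)] r) := by
          intro had
          have : (['a', 'd'] : List Char) <+: r :=
            pvScanGo_reflect [(pvK1, pvV1)] (by intro kv hm; fin_cases hm <;> simp [pvV1])
              ['a', 'd']
              (by intro kv hm a ha; fin_cases hm <;>
                    (simp at ha; rcases ha with rfl | rfl <;> simp [pvV1])) r had
          obtain ⟨q, hq⟩ := this
          exact hinf ⟨[], q, by simp [pvHL, pvK1, ← ht', ← hq]⟩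
        have hf1 : List.find? (fun kv => kv.1.isPrefixOf ('h' :: t')) [(pvK1, pvV1)] =
            some (pvK1, pvV1) := by
          have : pvK1 <+: ('h' :: t') := ⟨r, by rw [← ht']; rfl⟩
          simp [List.find?, List.isPrefixOf_iff_prefix.2 this]
        have hf2 : List.find? (fun kv => kv.1.isPrefixOf ('h' :: t'))
            [(pvK1, pvV1), (pvK2, pvV2)] = some (pvK1, pvV1) := by
          have : pvK1 <+: ('h' :: t') := ⟨r, by rw [← ht']; rfl⟩
          simp [List.find?, List.isPrefixOf_iff_prefix.2 this]
        rw [pvScanGo_some _ _ _ _ hf1, pvScanGo_some _ _ _ _ hf2]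
        have hdropr : t'.drop (pvK1.length - 1) = r := by rw [← ht']; simp [pvK1]
        rw [hdropr]
        rw [pvRep_append_nomatch pvK2 pvV2 _ pvV1 (by
          intro i hi
          simp [pvV1] at hi
          interval_cases i <;> simp [pvV1, pvK2, List.cons_prefix_cons]
          exact hnad)]
        rw [ih r hrlen (fun hx => hinf (hrsuffix _ hx))]
      · by_cases hk2 : pvK2 <+: (c :: t')
        · -- "sad" matches at the front
          obtain ⟨r, hr⟩ := hk2
          rw [show pvK2 ++ r = 's' :: (['a', 'd'] ++ r) from rfl] at hr
          injection hr with hac ht'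
          subst hac
          have hrlen : r.length ≤ n := by
            have := congrArg List.length ht'
            simp at this ht ⊢
            omega
          have hrsuffix : ∀ x : List Char, x <:+: r → x <:+: ('s' :: t') := by
            intro x hx
            exact hx.trans ⟨['s', 'a', 'd'], [], by simp [← ht']⟩
          have heq : 's' :: t' = pvK2 ++ r := by rw [← ht']; rfl
          rw [heq, pvScanGo_append_nomatch [(pvK1, pvV1)] r pvK2 (by
                intro i hi
                simp [pvK2] at hi
                interval_cases i <;> simp [pvK1, pvK2, List.find?, List.isPrefixOf]),
              pvRep_key pvK2 pvV2 (by simp [pvK2]) _]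
          have hf2 : List.find? (fun kv => kv.1.isPrefixOf (pvK2 ++ r))
              [(pvK1, pvV1), (pvK2, pvV2)] = some (pvK2, pvV2) := by
            simp [List.find?, pvK1, pvK2, List.isPrefixOf]
          rw [show pvK2 ++ r = 's' :: (['a', 'd'] ++ r) from rfl] at hf2 ⊢
          rw [pvScanGo_some _ _ _ _ hf2]
          have hdropr : (['a', 'd'] ++ r).drop (pvK2.length - 1) = r := by simp [pvK2]
          rw [hdropr, ih r hrlen (fun hx => hinf (hrsuffix _ hx))]
        · -- neither key matches at the front
          have hb1 : pvK1.isPrefixOf (c :: t') = false := by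
            cases hb : pvK1.isPrefixOf (c :: t')
            · rfl
            · exact absurd (List.isPrefixOf_iff_prefix.1 hb) hk1
          have hb2 : pvK2.isPrefixOf (c :: t') = false := by
            cases hb : pvK2.isPrefixOf (c :: t')
            · rfl
            · exact absurd (List.isPrefixOf_iff_prefix.1 hb) hk2
          have hf1 : List.find? (fun kv => kv.1.isPrefixOf (c :: t')) [(pvK1, pvV1)] = none := by
            simp [List.find?, hb1]
          have hf2 : List.find? (fun kv => kv.1.isPrefixOf (c :: t'))
              [(pvK1, pvV1), (pvK2, pvV2)] = none := by
            simp [List.find?, hb1, hb2]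
          have hnk : ¬ pvK2 <+: (c :: pvScanGo [(pvK1, pvV1)] t') := by
            intro hkk
            obtain ⟨hac, htl⟩ := List.cons_prefix_cons.1 hkk
            have : (['a', 'd'] : List Char) <+: t' :=
              pvScanGo_reflect [(pvK1, pvV1)] (by intro kv hm; fin_cases hm <;> simp [pvV1])
                ['a', 'd']
                (by intro kv hm a ha; fin_cases hm <;>
                      (simp at ha; rcases ha with rfl | rfl <;> simp [pvV1])) t' htl
            exact hk2 (List.cons_prefix_cons.2 ⟨hac, this⟩)
          have htailinf : ∀ x : List Char, x <:+: t' → x <:+: (c :: t') := by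
            intro x hx
            exact hx.trans ⟨[c], [], by simp⟩
          rw [pvScanGo_none _ _ _ hf1, pvScanGo_none _ _ _ hf2, pvRep_neg _ _ _ _ hnk,
              ih t' (by simp at ht ⊢; omega) (fun hx => hinf (htailinf _ hx))]


-- ==== tightness: A and B differ on EVERY input containing "happyad" ====

def pvHV : List Char :=
  ['j', 'o', 'y', 'o', 'u', 'm', 'e', 'l', 'a', 'n', 'c', 'h', 'o', 'l', 'i', 'c']

-- Unconditional version of stage 2: with the extra first rule "happyad" → "joyoumelancholic"
-- the two cascaded replaces equal a single scan on ALL inputs.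
theorem pvStage2six :
    ∀ (n : Nat) (t : List Char), t.length ≤ n →
      pvRep pvK2 pvV2 (pvScanGo [(pvK1, pvV1)] t) =
        pvScanGo [(pvHL, pvHV), (pvK1, pvV1), (pvK2, pvV2)] t := by
  intro n
  induction n with
  | zero =>
    intro t ht
    have : t = [] := List.eq_nil_of_length_eq_zero (Nat.le_zero.1 ht)
    subst this
    rw [pvScanGo_nil, pvScanGo_nil, pvRep_nil]
  | succ n ih =>
    intro t ht
    cases t with
    | nil => rw [pvScanGo_nil, pvScanGo_nil, pvRep_nil]
    | cons c t' =>
      by_cases hH : pvHL <+: (c :: t')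
      · obtain ⟨r, hr⟩ := hH
        rw [show pvHL ++ r = 'h' :: (['a', 'p', 'p', 'y', 'a', 'd'] ++ r) from rfl] at hr
        injection hr with hac ht'
        subst hac
        have hrlen : r.length ≤ n := by
          have := congrArg List.length ht'
          simp at this ht ⊢
          omega
        have hf1 : List.find? (fun kv => kv.1.isPrefixOf ('h' :: t')) [(pvK1, pvV1)] =
            some (pvK1, pvV1) := by
          have : pvK1 <+: ('h' :: t') := ⟨'a' :: 'd' :: r, by rw [← ht']; rfl⟩
          simp [List.find?, List.isPrefixOf_iff_prefix.2 this]
        rw [pvScanGo_some _ _ _ _ hf1]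
        have hdrop : t'.drop (pvK1.length - 1) = 'a' :: 'd' :: r := by rw [← ht']; simp [pvK1]
        rw [hdrop,
            show ('a' :: 'd' :: r) = ['a', 'd'] ++ r from rfl,
            pvScanGo_append_nomatch [(pvK1, pvV1)] r ['a', 'd'] (by
              intro i hi
              simp at hi
              interval_cases i <;> simp [pvK1, List.find?, List.isPrefixOf])]
        change pvRep pvK2 pvV2
            (['j', 'o', 'y', 'o', 'u'] ++ (pvK2 ++ pvScanGo [(pvK1, pvV1)] r)) = _
        rw [pvRep_append_nomatch pvK2 pvV2 _ ['j', 'o', 'y', 'o', 'u'] (by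
              intro i hi
              simp at hi
              interval_cases i <;> simp [pvK2, List.cons_prefix_cons]),
            pvRep_key pvK2 pvV2 (by simp [pvK2]) _, ih r hrlen]
        have hf6 : List.find? (fun kv => kv.1.isPrefixOf ('h' :: t'))
            [(pvHL, pvHV), (pvK1, pvV1), (pvK2, pvV2)] = some (pvHL, pvHV) := by
          have : pvHL <+: ('h' :: t') := ⟨r, by rw [← ht']; rfl⟩
          simp [List.find?, List.isPrefixOf_iff_prefix.2 this]
        rw [pvScanGo_some _ _ _ _ hf6]
        have hdrop6 : t'.drop (pvHL.length - 1) = r := by rw [← ht']; simp [pvHL, pvK1]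
        rw [hdrop6]
        rfl
      · have hbH : pvHL.isPrefixOf (c :: t') = false := by
          cases hb : pvHL.isPrefixOf (c :: t')
          · rfl
          · exact absurd (List.isPrefixOf_iff_prefix.1 hb) hH
        by_cases hk1 : pvK1 <+: (c :: t')
        · obtain ⟨r, hr⟩ := hk1
          rw [show pvK1 ++ r = 'h' :: (['a', 'p', 'p', 'y'] ++ r) from rfl] at hr
          injection hr with hac ht'
          subst hac
          have hrlen : r.length ≤ n := by
            have := congrArg List.length ht'
            simp at this ht ⊢
            omega
          have hnadr : ¬ ((['a', 'd'] : List Char) <+: r) := by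
            intro had
            obtain ⟨q, hq⟩ := had
            exact hH ⟨q, by rw [show pvHL ++ q = 'h' :: (['a', 'p', 'p', 'y'] ++ (['a', 'd'] ++ q)) from rfl, hq, ht']⟩
          have hnad : ¬ (['a', 'd'] <+: pvScanGo [(pvK1, pvV1)] r) := by
            intro had
            exact hnadr (pvScanGo_reflect [(pvK1, pvV1)]
              (by intro kv hm; fin_cases hm <;> simp [pvV1]) ['a', 'd']
              (by intro kv hm a ha; fin_cases hm <;>
                    (simp at ha; rcases ha with rfl | rfl <;> simp [pvV1])) r had)
          have hf1 : List.find? (fun kv => kv.1.isPrefixOf ('h' :: t')) [(pvK1, pvV1)] =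
              some (pvK1, pvV1) := by
            have : pvK1 <+: ('h' :: t') := ⟨r, by rw [← ht']; rfl⟩
            simp [List.find?, List.isPrefixOf_iff_prefix.2 this]
          have hf6 : List.find? (fun kv => kv.1.isPrefixOf ('h' :: t'))
              [(pvHL, pvHV), (pvK1, pvV1), (pvK2, pvV2)] = some (pvK1, pvV1) := by
            have : pvK1 <+: ('h' :: t') := ⟨r, by rw [← ht']; rfl⟩
            simp [List.find?, hbH, List.isPrefixOf_iff_prefix.2 this]
          rw [pvScanGo_some _ _ _ _ hf1, pvScanGo_some _ _ _ _ hf6]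
          have hdropr : t'.drop (pvK1.length - 1) = r := by rw [← ht']; simp [pvK1]
          rw [hdropr,
              pvRep_append_nomatch pvK2 pvV2 _ pvV1 (by
                intro i hi
                simp [pvV1] at hi
                interval_cases i <;> simp [pvV1, pvK2, List.cons_prefix_cons]
                exact hnad),
              ih r hrlen]
        · by_cases hk2 : pvK2 <+: (c :: t')
          · obtain ⟨r, hr⟩ := hk2
            rw [show pvK2 ++ r = 's' :: (['a', 'd'] ++ r) from rfl] at hr
            injection hr with hac ht'
            subst hac
            have hrlen : r.length ≤ n := by
              have := congrArg List.length ht'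
              simp at this ht ⊢
              omega
            have heq : 's' :: t' = pvK2 ++ r := by rw [← ht']; rfl
            rw [heq, pvScanGo_append_nomatch [(pvK1, pvV1)] r pvK2 (by
                  intro i hi
                  simp [pvK2] at hi
                  interval_cases i <;> simp [pvK1, pvK2, List.find?, List.isPrefixOf]),
                pvRep_key pvK2 pvV2 (by simp [pvK2]) _]
            have hf6 : List.find? (fun kv => kv.1.isPrefixOf (pvK2 ++ r))
                [(pvHL, pvHV), (pvK1, pvV1), (pvK2, pvV2)] = some (pvK2, pvV2) := by
              simp [List.find?, pvHL, pvK1, pvK2, List.isPrefixOf]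
            rw [show pvK2 ++ r = 's' :: (['a', 'd'] ++ r) from rfl] at hf6 ⊢
            rw [pvScanGo_some _ _ _ _ hf6]
            have hdropr : (['a', 'd'] ++ r).drop (pvK2.length - 1) = r := by simp [pvK2]
            rw [hdropr, ih r hrlen]
          · have hb1 : pvK1.isPrefixOf (c :: t') = false := by
              cases hb : pvK1.isPrefixOf (c :: t')
              · rfl
              · exact absurd (List.isPrefixOf_iff_prefix.1 hb) hk1
            have hb2 : pvK2.isPrefixOf (c :: t') = false := by
              cases hb : pvK2.isPrefixOf (c :: t')
              · rfl
              · exact absurd (List.isPrefixOf_iff_prefix.1 hb) hk2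
            have hf1 : List.find? (fun kv => kv.1.isPrefixOf (c :: t')) [(pvK1, pvV1)] =
                none := by simp [List.find?, hb1]
            have hf6 : List.find? (fun kv => kv.1.isPrefixOf (c :: t'))
                [(pvHL, pvHV), (pvK1, pvV1), (pvK2, pvV2)] = none := by
              simp [List.find?, hbH, hb1, hb2]
            have hnk : ¬ pvK2 <+: (c :: pvScanGo [(pvK1, pvV1)] t') := by
              intro hkk
              obtain ⟨hac, htl⟩ := List.cons_prefix_cons.1 hkk
              have : (['a', 'd'] : List Char) <+: t' :=
                pvScanGo_reflect [(pvK1, pvV1)]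
                  (by intro kv hm; fin_cases hm <;> simp [pvV1]) ['a', 'd']
                  (by intro kv hm a ha; fin_cases hm <;>
                        (simp at ha; rcases ha with rfl | rfl <;> simp [pvV1])) t' htl
              exact hk2 (List.cons_prefix_cons.2 ⟨hac, this⟩)
            rw [pvScanGo_none _ _ _ hf1, pvScanGo_none _ _ _ hf6, pvRep_neg _ _ _ _ hnk,
                ih t' (by simp at ht ⊢; omega)]

-- ==== end stage ====

-- Full assembly on char lists: the five-pass replace cascade equals the single five-key scan.
theorem pvMain (t : List Char) (hinf : ¬ (pvHL <:+: t)) :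
    pvRep pvK5 pvV5 (pvRep pvK4 pvV4 (pvRep pvK3 pvV3 (pvRep pvK2 pvV2 (pvRep pvK1 pvV1 t)))) =
      pvScanGo [(pvK1, pvV1), (pvK2, pvV2), (pvK3, pvV3), (pvK4, pvV4), (pvK5, pvV5)] t := by
  rw [← pvScan_one pvK1 pvV1 t.length t le_rfl,
      pvStage2 t.length t le_rfl hinf]
  rw [show ([(pvK1, pvV1), (pvK2, pvV2)] : List (List Char × List Char)) =
        [(pvK1, pvV1), (pvK2, pvV2)] from rfl]
  rw [pvStage [(pvK1, pvV1), (pvK2, pvV2)] pvK3 pvV3 (by simp [pvK3])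
        (by intro kv hm; fin_cases hm <;> simp [pvV1, pvV2])
        (by intro kv hm b i hi; fin_cases hm <;>
              (simp [pvV1, pvV2] at hi; interval_cases i <;>
                simp [pvV1, pvV2, pvK3, List.cons_prefix_cons]))
        (by intro kv hm a ha; fin_cases hm <;>
              (simp [pvK3] at ha; rcases ha with rfl | rfl | rfl | rfl <;> simp [pvV1, pvV2]))
        (by intro b i hi; simp [pvK3] at hi; interval_cases i <;>
              simp [pvK1, pvK2, pvK3, List.find?, List.isPrefixOf])
        t.length t le_rfl]
  rw [show ([(pvK1, pvV1), (pvK2, pvV2)] ++ [(pvK3, pvV3)] : List (List Char × List Char)) =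
        [(pvK1, pvV1), (pvK2, pvV2), (pvK3, pvV3)] from rfl]
  rw [pvStage [(pvK1, pvV1), (pvK2, pvV2), (pvK3, pvV3)] pvK4 pvV4 (by simp [pvK4])
        (by intro kv hm; fin_cases hm <;> simp [pvV1, pvV2, pvV3])
        (by intro kv hm b i hi; fin_cases hm <;>
              (simp [pvV1, pvV2, pvV3] at hi; interval_cases i <;>
                simp [pvV1, pvV2, pvV3, pvK4, List.cons_prefix_cons]))
        (by intro kv hm a ha; fin_cases hm <;>
              (simp [pvK4] at ha; rcases ha with rfl | rfl | rfl <;> simp [pvV1, pvV2, pvV3]))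
        (by intro b i hi; simp [pvK4] at hi; interval_cases i <;>
              simp [pvK1, pvK2, pvK3, pvK4, List.find?, List.isPrefixOf])
        t.length t le_rfl]
  rw [show ([(pvK1, pvV1), (pvK2, pvV2), (pvK3, pvV3)] ++ [(pvK4, pvV4)] :
        List (List Char × List Char)) =
        [(pvK1, pvV1), (pvK2, pvV2), (pvK3, pvV3), (pvK4, pvV4)] from rfl]
  rw [pvStage [(pvK1, pvV1), (pvK2, pvV2), (pvK3, pvV3), (pvK4, pvV4)] pvK5 pvV5
        (by simp [pvK5])
        (by intro kv hm; fin_cases hm <;> simp [pvV1, pvV2, pvV3, pvV4])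
        (by intro kv hm b i hi; fin_cases hm <;>
              (simp [pvV1, pvV2, pvV3, pvV4] at hi; interval_cases i <;>
                simp [pvV1, pvV2, pvV3, pvV4, pvK5, List.cons_prefix_cons]))
        (by intro kv hm a ha; fin_cases hm <;>
              (simp [pvK5] at ha; rcases ha with rfl | rfl | rfl <;>
                simp [pvV1, pvV2, pvV3, pvV4]))
        (by intro b i hi; simp [pvK5] at hi; interval_cases i <;>
              simp [pvK1, pvK2, pvK3, pvK4, pvK5, List.find?, List.isPrefixOf])
        t.length t le_rfl]
  rfl


-- The full replace cascade equals, on ALL inputs, the six-rule scan whose first rule is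
-- "happyad" → "joyoumelancholic" (the emergent boundary match made explicit).
theorem pvMain6 (t : List Char) :
    pvRep pvK5 pvV5 (pvRep pvK4 pvV4 (pvRep pvK3 pvV3 (pvRep pvK2 pvV2 (pvRep pvK1 pvV1 t)))) =
      pvScanGo [(pvHL, pvHV), (pvK1, pvV1), (pvK2, pvV2), (pvK3, pvV3), (pvK4, pvV4),
        (pvK5, pvV5)] t := by
  rw [← pvScan_one pvK1 pvV1 t.length t le_rfl,
      pvStage2six t.length t le_rfl]
  rw [pvStage [(pvHL, pvHV), (pvK1, pvV1), (pvK2, pvV2)] pvK3 pvV3 (by simp [pvK3])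
        (by intro kv hm; fin_cases hm <;> simp [pvHV, pvV1, pvV2])
        (by intro kv hm b i hi; fin_cases hm <;>
              (simp [pvHV, pvV1, pvV2] at hi; interval_cases i <;>
                simp [pvHV, pvV1, pvV2, pvK3, List.cons_prefix_cons]))
        (by intro kv hm a ha; fin_cases hm <;>
              (simp [pvK3] at ha; rcases ha with rfl | rfl | rfl | rfl <;>
                simp [pvHV, pvV1, pvV2]))
        (by intro b i hi; simp [pvK3] at hi; interval_cases i <;>
              simp [pvHL, pvK1, pvK2, pvK3, List.find?, List.isPrefixOf])
        t.length t le_rfl]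
  rw [show ([(pvHL, pvHV), (pvK1, pvV1), (pvK2, pvV2)] ++ [(pvK3, pvV3)] :
        List (List Char × List Char)) =
        [(pvHL, pvHV), (pvK1, pvV1), (pvK2, pvV2), (pvK3, pvV3)] from rfl]
  rw [pvStage [(pvHL, pvHV), (pvK1, pvV1), (pvK2, pvV2), (pvK3, pvV3)] pvK4 pvV4
        (by simp [pvK4])
        (by intro kv hm; fin_cases hm <;> simp [pvHV, pvV1, pvV2, pvV3])
        (by intro kv hm b i hi; fin_cases hm <;>
              (simp [pvHV, pvV1, pvV2, pvV3] at hi; interval_cases i <;>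
                simp [pvHV, pvV1, pvV2, pvV3, pvK4, List.cons_prefix_cons]))
        (by intro kv hm a ha; fin_cases hm <;>
              (simp [pvK4] at ha; rcases ha with rfl | rfl | rfl <;>
                simp [pvHV, pvV1, pvV2, pvV3]))
        (by intro b i hi; simp [pvK4] at hi; interval_cases i <;>
              simp [pvHL, pvK1, pvK2, pvK3, pvK4, List.find?, List.isPrefixOf])
        t.length t le_rfl]
  rw [show ([(pvHL, pvHV), (pvK1, pvV1), (pvK2, pvV2), (pvK3, pvV3)] ++ [(pvK4, pvV4)] :
        List (List Char × List Char)) =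
        [(pvHL, pvHV), (pvK1, pvV1), (pvK2, pvV2), (pvK3, pvV3), (pvK4, pvV4)] from rfl]
  rw [pvStage [(pvHL, pvHV), (pvK1, pvV1), (pvK2, pvV2), (pvK3, pvV3), (pvK4, pvV4)] pvK5 pvV5
        (by simp [pvK5])
        (by intro kv hm; fin_cases hm <;> simp [pvHV, pvV1, pvV2, pvV3, pvV4])
        (by intro kv hm b i hi; fin_cases hm <;>
              (simp [pvHV, pvV1, pvV2, pvV3, pvV4] at hi; interval_cases i <;>
                simp [pvHV, pvV1, pvV2, pvV3, pvV4, pvK5, List.cons_prefix_cons]))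
        (by intro kv hm a ha; fin_cases hm <;>
              (simp [pvK5] at ha; rcases ha with rfl | rfl | rfl <;>
                simp [pvHV, pvV1, pvV2, pvV3, pvV4]))
        (by intro b i hi; simp [pvK5] at hi; interval_cases i <;>
              simp [pvHL, pvK1, pvK2, pvK3, pvK4, pvK5, List.find?, List.isPrefixOf])
        t.length t le_rfl]
  rfl

-- If "happyad" occurs in k ++ r but not at position 0, and 'h' does not occur in k.tail,
-- then it occurs in r.
theorem pvNoH (k r : List Char) (hk : ∀ a ∈ k.tail, a ≠ 'h')
    (hinf : pvHL <:+: (k ++ r)) (hpre : ¬ pvHL <+: (k ++ r)) : pvHL <:+: r := by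
  obtain ⟨j, hj⟩ := (PySem.Chars.exists_prefix_drop_iff_isIn pvHL (k ++ r)).2
    ((PySem.Chars.isIn_iff_infix pvHL (k ++ r)).2 hinf)
  rcases Nat.lt_or_ge j k.length with hjk | hjk
  · rcases Nat.eq_zero_or_pos j with rfl | hj1
    · exact absurd (by simpa using hj) hpre
    · exfalso
      rw [List.drop_append_of_le_length (Nat.le_of_lt hjk),
          List.drop_eq_getElem_cons hjk, List.cons_append] at hj
      have hh : k[j] = 'h' := ((List.cons_prefix_cons.1 (by simpa [pvHL, pvK1] using hj)).1).symm
      have hmem : k[j] ∈ k.tail := by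
        have hjt : j - 1 < k.tail.length := by simp [List.length_tail]; omega
        have : k.tail[j - 1] = k[j] := by
          rw [List.getElem_tail]
          congr 1
          omega
        rw [← this]
        exact List.getElem_mem hjt
      exact hk _ hmem hh
  · obtain ⟨m, rfl⟩ : ∃ m, j = k.length + m := ⟨j - k.length, by omega⟩
    rw [List.drop_length_add_append] at hj
    exact (PySem.Chars.isIn_iff_infix pvHL r).1
      ((PySem.Chars.exists_prefix_drop_iff_isIn pvHL r).1 ⟨m, hj⟩)

-- Length comparison: the six-rule scan is never shorter than the five-rule scan, and is at
-- least 8 characters longer as soon as "happyad" occurs in the input.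
set_option maxRecDepth 8192 in
theorem pvLen :
    ∀ (n : Nat) (t : List Char), t.length ≤ n →
      (pvScanGo [(pvK1, pvV1), (pvK2, pvV2), (pvK3, pvV3), (pvK4, pvV4), (pvK5, pvV5)]
          t).length ≤
        (pvScanGo [(pvHL, pvHV), (pvK1, pvV1), (pvK2, pvV2), (pvK3, pvV3), (pvK4, pvV4),
          (pvK5, pvV5)] t).length ∧
      (pvHL <:+: t →
        (pvScanGo [(pvK1, pvV1), (pvK2, pvV2), (pvK3, pvV3), (pvK4, pvV4), (pvK5, pvV5)]
            t).length + 8 ≤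
          (pvScanGo [(pvHL, pvHV), (pvK1, pvV1), (pvK2, pvV2), (pvK3, pvV3), (pvK4, pvV4),
            (pvK5, pvV5)] t).length) := by
  intro n
  induction n with
  | zero =>
    intro t ht
    have : t = [] := List.eq_nil_of_length_eq_zero (Nat.le_zero.1 ht)
    subst this
    refine ⟨by rw [pvScanGo_nil, pvScanGo_nil], ?_⟩
    intro hinf
    exact absurd (List.infix_nil.1 hinf) (by simp [pvHL, pvK1])
  | succ n ih =>
    intro t ht
    cases t with
    | nil =>
      refine ⟨by rw [pvScanGo_nil, pvScanGo_nil], ?_⟩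
      intro hinf
      exact absurd (List.infix_nil.1 hinf) (by simp [pvHL, pvK1])
    | cons c t' =>
      by_cases hH : pvHL <+: (c :: t')
      · obtain ⟨r, hr⟩ := hH
        rw [show pvHL ++ r = 'h' :: (['a', 'p', 'p', 'y', 'a', 'd'] ++ r) from rfl] at hr
        injection hr with hac ht'
        subst hac
        have hrlen : r.length ≤ n := by
          have := congrArg List.length ht'
          simp at this ht ⊢
          omega
        have hf6 : List.find? (fun kv => kv.1.isPrefixOf ('h' :: t'))
            [(pvHL, pvHV), (pvK1, pvV1), (pvK2, pvV2), (pvK3, pvV3), (pvK4, pvV4),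
              (pvK5, pvV5)] = some (pvHL, pvHV) := by
          have : pvHL <+: ('h' :: t') := ⟨r, by rw [← ht']; rfl⟩
          simp [List.find?, List.isPrefixOf_iff_prefix.2 this]
        have hf5 : List.find? (fun kv => kv.1.isPrefixOf ('h' :: t'))
            [(pvK1, pvV1), (pvK2, pvV2), (pvK3, pvV3), (pvK4, pvV4), (pvK5, pvV5)] =
            some (pvK1, pvV1) := by
          have : pvK1 <+: ('h' :: t') := ⟨'a' :: 'd' :: r, by rw [← ht']; rfl⟩
          simp [List.find?, List.isPrefixOf_iff_prefix.2 this]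
        rw [pvScanGo_some _ _ _ _ hf6, pvScanGo_some _ _ _ _ hf5]
        have hd6 : t'.drop (pvHL.length - 1) = r := by rw [← ht']; simp [pvHL, pvK1]
        have hd5 : t'.drop (pvK1.length - 1) = 'a' :: 'd' :: r := by rw [← ht']; simp [pvK1]
        rw [hd6, hd5,
            show ('a' :: 'd' :: r) = ['a', 'd'] ++ r from rfl,
            pvScanGo_append_nomatch _ r ['a', 'd'] (by
              intro i hi
              simp at hi
              interval_cases i <;>
                simp [pvK1, pvK2, pvK3, pvK4, pvK5, List.find?, List.isPrefixOf])]
        have hIH := (ih r hrlen).1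
        have l1 : pvV1.length = 6 := rfl
        have l2 : pvHV.length = 16 := rfl
        have l3 : (['a', 'd'] : List Char).length = 2 := rfl
        constructor
        · simp only [List.length_append, l1, l2, l3]
          omega
        · intro _
          simp only [List.length_append, l1, l2, l3]
          omega
      · have hbH : pvHL.isPrefixOf (c :: t') = false := by
          cases hb : pvHL.isPrefixOf (c :: t')
          · rfl
          · exact absurd (List.isPrefixOf_iff_prefix.1 hb) hH
        cases hf5 : List.find? (fun kv => kv.1.isPrefixOf (c :: t'))
            [(pvK1, pvV1), (pvK2, pvV2), (pvK3, pvV3), (pvK4, pvV4), (pvK5, pvV5)] with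
        | some kv =>
          have hf6 : List.find? (fun kv => kv.1.isPrefixOf (c :: t'))
              [(pvHL, pvHV), (pvK1, pvV1), (pvK2, pvV2), (pvK3, pvV3), (pvK4, pvV4),
                (pvK5, pvV5)] = some kv := by
            rw [show ([(pvHL, pvHV), (pvK1, pvV1), (pvK2, pvV2), (pvK3, pvV3), (pvK4, pvV4),
                  (pvK5, pvV5)] : List (List Char × List Char)) =
                [(pvHL, pvHV)] ++ [(pvK1, pvV1), (pvK2, pvV2), (pvK3, pvV3), (pvK4, pvV4),
                  (pvK5, pvV5)] from rfl, List.find?_append, hf5]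
            simp [List.find?, hbH]
          obtain ⟨r, hr⟩ := (show kv.1 <+: (c :: t') by
            simpa using List.find?_some hf5)
          have hmem := List.mem_of_find?_eq_some hf5
          have hkne : kv.1 ≠ [] := by fin_cases hmem <;> simp [pvK1, pvK2, pvK3, pvK4, pvK5]
          have htail : ∀ a ∈ kv.1.tail, a ≠ 'h' := by fin_cases hmem <;> simp [pvK1, pvK2, pvK3, pvK4, pvK5]
          have hdrop : t'.drop (kv.1.length - 1) = r := by
            cases hk : kv.1 with
            | nil => exact absurd hk hkne
            | cons a ktl =>
              rw [hk, List.cons_append] at hr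
              have ht' : ktl ++ r = t' := by injection hr
              rw [← ht']
              simp
          rw [pvScanGo_some _ _ _ _ hf6, pvScanGo_some _ _ _ _ hf5, hdrop]
          have hk1 : 0 < kv.1.length := List.length_pos_iff.2 hkne
          have hlent : t'.length ≤ n := by
            have : (c :: t').length ≤ n + 1 := ht
            simp at this
            omega
          have hlr : kv.1.length + r.length = t'.length + 1 := by
            have := congrArg List.length hr
            simpa using this
          have hrlen : r.length ≤ n := by omega
          have hIH := ih r hrlen
          refine ⟨by simp only [List.length_append]; have := hIH.1; omega, ?_⟩
          intro hinf
          have hinfr : pvHL <:+: r := by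
            rw [← hr] at hinf hH
            exact pvNoH kv.1 r htail hinf hH
          have := hIH.2 hinfr
          simp only [List.length_append]
          omega
        | none =>
          have hf6 : List.find? (fun kv => kv.1.isPrefixOf (c :: t'))
              [(pvHL, pvHV), (pvK1, pvV1), (pvK2, pvV2), (pvK3, pvV3), (pvK4, pvV4),
                (pvK5, pvV5)] = none := by
            rw [show ([(pvHL, pvHV), (pvK1, pvV1), (pvK2, pvV2), (pvK3, pvV3), (pvK4, pvV4),
                  (pvK5, pvV5)] : List (List Char × List Char)) =
                [(pvHL, pvHV)] ++ [(pvK1, pvV1), (pvK2, pvV2), (pvK3, pvV3), (pvK4, pvV4),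
                  (pvK5, pvV5)] from rfl, List.find?_append, hf5]
            simp [List.find?, hbH]
          rw [pvScanGo_none _ _ _ hf6, pvScanGo_none _ _ _ hf5]
          have hIH := ih t' (by simp at ht ⊢; omega)
          refine ⟨by simpa using hIH.1, ?_⟩
          intro hinf
          have hinft : pvHL <:+: t' := by
            have := pvNoH [c] t' (by simp) (by simpa using hinf) (by simpa using hH)
            exact this
          have := hIH.2 hinft
          simp
          omega

-- ===== VERDICT (by name: the statement is the Claim_ definition above) =====
theorem amplify_emotion_py_spec : Claim_unchanged_amplify_emotion_py := by
  intro content _hdom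
  unfold Spec_amplify_emotion_py
  intro hD
  have hinf : ¬ (pvHL <:+: content.toList) := by
    intro hsub
    exact hD ((PySem.Str.isIn_iff_infix "happyad" content).2
      (by rw [show "happyad".toList = pvHL from rfl]; exact hsub))
  show (List.foldl (fun content kv => PySem.Str.replace content kv.1 kv.2) content
      [("happy", "joyous"), ("sad", "melancholic"), ("angry", "tempestuous"),
       ("love", "passionate"), ("fear", "trembling")]) =
    amplify_emotion_py_alt content
  simp only [List.foldl]
  have key :
      (PySem.Str.replace (PySem.Str.replace (PySem.Str.replace (PySem.Str.replace
        (PySem.Str.replace content "happy" "joyous") "sad" "melancholic")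
        "angry" "tempestuous") "love" "passionate") "fear" "trembling").toList =
      (amplify_emotion_py_alt content).toList := by
    show _ = (String.ofList (pvScanGo
      [("happy".toList, "joyous".toList), ("sad".toList, "melancholic".toList),
       ("angry".toList, "tempestuous".toList), ("love".toList, "passionate".toList),
       ("fear".toList, "trembling".toList)] content.toList)).toList
    rw [String.toList_ofList]
    simp only [PySem.Str.toList_replace]
    rw [pv_replace_eq _ _ _ (by simp), pv_replace_eq _ _ _ (by simp),
        pv_replace_eq _ _ _ (by simp), pv_replace_eq _ _ _ (by simp),
        pv_replace_eq _ _ _ (by simp)]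
    exact pvMain content.toList hinf
  calc (PySem.Str.replace (PySem.Str.replace (PySem.Str.replace (PySem.Str.replace
        (PySem.Str.replace content "happy" "joyous") "sad" "melancholic")
        "angry" "tempestuous") "love" "passionate") "fear" "trembling")
      = String.ofList (PySem.Str.replace (PySem.Str.replace (PySem.Str.replace
          (PySem.Str.replace (PySem.Str.replace content "happy" "joyous") "sad" "melancholic")
          "angry" "tempestuous") "love" "passionate") "fear" "trembling").toList :=
        String.ofList_toList.symm
    _ = String.ofList (amplify_emotion_py_alt content).toList := by rw [key]
    _ = amplify_emotion_py_alt content := String.ofList_toList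

theorem amplify_emotion_py_changed : Claim_changed_amplify_emotion_py := by
  unfold Claim_changed_amplify_emotion_py
  refine ⟨by decide, by decide, by decide, ?_, by decide⟩
  show amplify_emotion_py_alt "happyad" = "joyousad"
  show String.ofList (pvScanGo
    [("happy".toList, "joyous".toList), ("sad".toList, "melancholic".toList),
     ("angry".toList, "tempestuous".toList), ("love".toList, "passionate".toList),
     ("fear".toList, "trembling".toList)] "happyad".toList) = "joyousad"
  rw [show "happyad".toList = 'h' :: ['a', 'p', 'p', 'y', 'a', 'd'] from rfl,
      pvScanGo_some _ _ _ ("happy".toList, "joyous".toList) (by decide),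
      show List.drop (("happy".toList).length - 1) ['a', 'p', 'p', 'y', 'a', 'd'] = 'a' :: ['d'] from rfl,
      pvScanGo_none _ _ _ (by decide),
      pvScanGo_none _ _ _ (by decide),
      pvScanGo_nil]
  decide

theorem amplify_emotion_py_tight : Claim_exact_amplify_emotion_py := by
  intro content _hdom hD heq
  have hinf : pvHL <:+: content.toList := by
    have h1 := (PySem.Str.isIn_iff_infix "happyad" content).1 hD
    rw [show "happyad".toList = pvHL from rfl] at h1
    exact h1
  have hA : (amplify_emotion_py content).toList =
      pvScanGo [(pvHL, pvHV), (pvK1, pvV1), (pvK2, pvV2), (pvK3, pvV3), (pvK4, pvV4),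
        (pvK5, pvV5)] content.toList := by
    show (List.foldl (fun content kv => PySem.Str.replace content kv.1 kv.2) content
      [("happy", "joyous"), ("sad", "melancholic"), ("angry", "tempestuous"),
       ("love", "passionate"), ("fear", "trembling")]).toList = _
    simp only [List.foldl]
    simp only [PySem.Str.toList_replace]
    rw [pv_replace_eq _ _ _ (by simp), pv_replace_eq _ _ _ (by simp),
        pv_replace_eq _ _ _ (by simp), pv_replace_eq _ _ _ (by simp),
        pv_replace_eq _ _ _ (by simp)]
    exact pvMain6 content.toList
  have hB : (amplify_emotion_py_alt content).toList =
      pvScanGo [(pvK1, pvV1), (pvK2, pvV2), (pvK3, pvV3), (pvK4, pvV4), (pvK5, pvV5)]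
        content.toList := by
    show (String.ofList (pvScanGo
      [("happy".toList, "joyous".toList), ("sad".toList, "melancholic".toList),
       ("angry".toList, "tempestuous".toList), ("love".toList, "passionate".toList),
       ("fear".toList, "trembling".toList)] content.toList)).toList = _
    rw [String.toList_ofList]
    rfl
  have hlen := (pvLen content.toList.length content.toList le_rfl).2 hinf
  rw [heq, hB] at hA
  rw [← hA] at hlen
  omega
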